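-- pv_equiv track=rewrite | github.com/seravion/FileOps | src/fileops/operations.py | _rebalance_groups_to_target
-- ===== SOURCE A (Python) =====
-- def _rebalance_groups_to_target(groups: list[list[int]], target_parts: int) -> list[list[int]]:
--     normalized = [group[:] for group in groups if group]
--     if not normalized:
--         return [[]]
--
--     while len(normalized) < target_parts:
--         split_index = -1
--         split_length = 1
--         for idx, group in enumerate(normalized):
--             if len(group) > split_length:
--                 split_index = idx
--                 split_length = len(group)
--
--         if split_index < 0:
--             break
--
--         group = normalized.pop(split_index)
--         mid = len(group) // 2
--         normalized.insert(split_index, group[:mid])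
--         normalized.insert(split_index + 1, group[mid:])
--
--     return normalized
-- ===== SOURCE B (Python) =====
-- def _rebalance_groups_to_target(groups: list[list[int]], target_parts: int) -> list[list[int]]:
--     # Batched rounds: each round splits every piece of the current maximum
--     # length (left to right) while splits are still needed; halves are always
--     # strictly shorter than the round's maximum, so this matches splitting the
--     # leftmost-largest piece one at a time.
--     parts = [list(g) for g in groups if g]
--     if not parts:
--         return [[]]
--
--     need = target_parts - len(parts)
--     while need > 0:
--         m = max(len(g) for g in parts)
--         if m <= 1:
--             break
--         out = []
--         for g in parts:
--             if need > 0 and len(g) == m: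
--                 mid = len(g) // 2
--                 out.append(g[:mid])
--                 out.append(g[mid:])
--                 need -= 1
--             else:
--                 out.append(g)
--         parts = out
--     return parts
-- ===== Notes on version B (the rewrite author's own statement) =====
-- stated objective: faster
-- what changed: Replaces the per-split argmax scan with pop/insert index surgery by batched rounds: each round rebuilds the list once, splitting every piece of the current maximum length left to right while splits remain, since fresh halves are always strictly shorter than the round maximum.
import Mathlib
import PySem

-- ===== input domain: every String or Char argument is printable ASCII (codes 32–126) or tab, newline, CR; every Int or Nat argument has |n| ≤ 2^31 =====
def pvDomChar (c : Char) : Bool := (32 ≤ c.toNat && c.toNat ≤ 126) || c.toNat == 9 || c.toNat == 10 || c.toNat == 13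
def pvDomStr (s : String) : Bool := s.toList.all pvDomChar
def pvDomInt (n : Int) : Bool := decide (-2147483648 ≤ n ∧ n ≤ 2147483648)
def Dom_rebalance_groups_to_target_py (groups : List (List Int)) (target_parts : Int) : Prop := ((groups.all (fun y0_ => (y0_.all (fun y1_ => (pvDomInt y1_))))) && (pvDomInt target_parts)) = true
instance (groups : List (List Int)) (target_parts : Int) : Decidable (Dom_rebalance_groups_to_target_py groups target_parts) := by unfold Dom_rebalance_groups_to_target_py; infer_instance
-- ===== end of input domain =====

-- B replaces A's one-split-per-iteration argmax scan by batched rounds (each round splits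
-- every piece of the current maximum length, left to right, while splits remain); the
-- return values are proved identical on all inputs.

-- ===== PORT A =====

-- the `for idx, group in enumerate(normalized)` argmax scan, state = (split_index, split_length)
def findSplitAux : List (List Int) → Int → Int × Int → Int × Int
  | [], _, acc => acc
  | g :: rest, idx, acc =>
      findSplitAux rest (idx + 1) (if (g.length : Int) > acc.2 then (idx, (g.length : Int)) else acc)

-- the `while len(normalized) < target_parts` loop of A; `(findSplitAux … ).1` is split_index
def loopA (normalized : List (List Int)) (target_parts : Int) : List (List Int) :=
  if (normalized.length : Int) < target_parts then
    if (findSplitAux normalized 0 (-1, 1)).1 < 0 then normalized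
    else
      match h : PySem.List.pop? normalized ((findSplitAux normalized 0 (-1, 1)).1) with
      | none => normalized   -- unreachable: split_index is a valid index produced by the scan
      | some gr =>
          loopA (PySem.List.insert
                   (PySem.List.insert gr.2 ((findSplitAux normalized 0 (-1, 1)).1)
                     (PySem.List.slice gr.1 none (some (PySem.Int.floordiv (gr.1.length : Int) 2))))
                   ((findSplitAux normalized 0 (-1, 1)).1 + 1)
                   (PySem.List.slice gr.1 (some (PySem.Int.floordiv (gr.1.length : Int) 2)) none))
                target_parts
  else normalized
termination_by (target_parts - (normalized.length : Int)).toNat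
decreasing_by
  have hl := PySem.List.length_of_pop?_eq_some _ h
  simp only [PySem.List.length_insert]
  omega

def rebalance_groups_to_target_py (groups : List (List Int)) (target_parts : Int) : List (List Int) :=
  let normalized := (groups.filter (fun g => !g.isEmpty)).map (fun g => PySem.List.slice g none none)
  if normalized.isEmpty then [[]] else loopA normalized target_parts

-- ===== PORT B =====

-- `max(len(g) for g in parts)`; parts is nonempty where B calls this and lengths are ≥ 0,
-- so the running maximum started at 0 equals Python's max of the generator
def maxLenB (parts : List (List Int)) : Int :=
  parts.foldl (fun a g => max a (g.length : Int)) 0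

-- the `for g in parts` round body of B, building (out, need)
def roundB : List (List Int) → Int → Int → List (List Int) × Int
  | [], need, _ => ([], need)
  | g :: rest, need, m =>
      if need > 0 ∧ (g.length : Int) = m then
        (PySem.List.slice g none (some (PySem.Int.floordiv (g.length : Int) 2)) ::
           PySem.List.slice g (some (PySem.Int.floordiv (g.length : Int) 2)) none ::
           (roundB rest (need - 1) m).1,
         (roundB rest (need - 1) m).2)
      else
        (g :: (roundB rest need m).1, (roundB rest need m).2)

-- facts cited by loopB's decreasing_by
theorem roundB_need_bounds (parts : List (List Int)) (need m : Int) (h : 0 ≤ need) :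
    0 ≤ (roundB parts need m).2 ∧ (roundB parts need m).2 ≤ need := by
  induction parts generalizing need with
  | nil => simp [roundB, h]
  | cons g rest ih =>
      by_cases hc : need > 0 ∧ (g.length : Int) = m
      · have := ih (need - 1) (by omega)
        simp only [roundB, if_pos hc]
        omega
      · have := ih need h
        simp only [roundB, if_neg hc]
        omega

theorem roundB_need_lt (parts : List (List Int)) (need m : Int) (h : 0 < need)
    (hx : ∃ g ∈ parts, (g.length : Int) = m) : (roundB parts need m).2 < need := by
  induction parts generalizing need with
  | nil => simp at hx
  | cons g rest ih =>
      by_cases hc : need > 0 ∧ (g.length : Int) = m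
      · have := roundB_need_bounds rest (need - 1) m (by omega)
        simp only [roundB, if_pos hc]
        omega
      · obtain ⟨g', hg', hlen⟩ := hx
        rcases List.mem_cons.mp hg' with rfl | h1
        · exact absurd ⟨h, hlen⟩ hc
        · have := ih need h ⟨g', h1, hlen⟩
          simp only [roundB, if_neg hc]
          exact this

theorem maxLenB_attained (parts : List (List Int)) :
    maxLenB parts = 0 ∨ ∃ g ∈ parts, (g.length : Int) = maxLenB parts := by
  unfold maxLenB
  suffices h : ∀ (init : Int), parts.foldl (fun a g => max a (g.length : Int)) init = init ∨
      ∃ g ∈ parts, (g.length : Int) = parts.foldl (fun a g => max a (g.length : Int)) init from h 0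
  induction parts with
  | nil => intro init; left; rfl
  | cons g rest ih =>
      intro init
      rcases ih (max init (g.length : Int)) with h | h
      · simp only [List.foldl_cons, h]
        by_cases h2 : init ≤ (g.length : Int)
        · right; exact ⟨g, by simp, by omega⟩
        · left; omega
      · obtain ⟨g', hg', hlen⟩ := h
        right
        exact ⟨g', by simp [hg'], by simpa [List.foldl_cons] using hlen⟩

-- the `while need > 0` loop of B
def loopB (parts : List (List Int)) (need : Int) : List (List Int) :=
  if need > 0 then
    if maxLenB parts ≤ 1 then parts
    else
      loopB (roundB parts need (maxLenB parts)).1 (roundB parts need (maxLenB parts)).2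
  else parts
termination_by need.toNat
decreasing_by
  rename_i hn hm
  have hx : ∃ g ∈ parts, (g.length : Int) = maxLenB parts := by
    rcases maxLenB_attained parts with h | h
    · omega
    · exact h
  have h1 := roundB_need_lt parts need (maxLenB parts) hn hx
  have h2 := (roundB_need_bounds parts need (maxLenB parts) (by omega)).1
  omega

def rebalance_groups_to_target_py_alt (groups : List (List Int)) (target_parts : Int) : List (List Int) :=
  let parts := (groups.filter (fun g => !g.isEmpty)).map (fun g => PySem.List.slice g none none)
  if parts.isEmpty then [[]]
  else loopB parts (target_parts - (parts.length : Int))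

-- ===== PRECONDITION & SPEC =====
def Spec_rebalance_groups_to_target_py (groups : List (List Int)) (target_parts : Int) (out : List (List Int)) : Prop := out = rebalance_groups_to_target_py_alt groups target_parts
instance (groups : List (List Int)) (target_parts : Int) (out : List (List Int)) : Decidable (Spec_rebalance_groups_to_target_py groups target_parts out) := by unfold Spec_rebalance_groups_to_target_py; infer_instance

-- ===== CLAIM (what is proved, stated in full; the proofs are below) =====
def Claim_equal_rebalance_groups_to_target_py : Prop := ∀ (groups : List (List Int)) (target_parts : Int), Dom_rebalance_groups_to_target_py groups target_parts → Spec_rebalance_groups_to_target_py groups target_parts (rebalance_groups_to_target_py groups target_parts)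

-- ===== LEMMAS AND PROOFS =====

-- the two halves, as take/drop
theorem slice_half_left (g : List Int) :
    PySem.List.slice g none (some (PySem.Int.floordiv (g.length : Int) 2)) = g.take (g.length / 2) := by
  have hmid : PySem.Int.floordiv (g.length : Int) 2 = ((g.length / 2 : Nat) : Int) := by
    rw [PySem.Int.floordiv_eq_ediv_of_pos (by omega)]
    exact_mod_cast (Int.natCast_ediv g.length 2).symm
  rw [hmid, PySem.List.slice_to _ (by positivity)]
  simp
  omega

theorem slice_half_right (g : List Int) :
    PySem.List.slice g (some (PySem.Int.floordiv (g.length : Int) 2)) none = g.drop (g.length / 2) := by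
  have hmid : PySem.Int.floordiv (g.length : Int) 2 = ((g.length / 2 : Nat) : Int) := by
    rw [PySem.Int.floordiv_eq_ediv_of_pos (by omega)]
    exact_mod_cast (Int.natCast_ediv g.length 2).symm
  rw [hmid, PySem.List.slice_from _ (by positivity)]
  simp
  omega

-- one split step of A (split the first longest piece in two); `none` = A's break
def stepA (parts : List (List Int)) : Option (List (List Int)) :=
  if (findSplitAux parts 0 (-1, 1)).1 < 0 then none
  else
    match PySem.List.pop? parts ((findSplitAux parts 0 (-1, 1)).1) with
    | none => none
    | some gr =>
        some (PySem.List.insert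
                (PySem.List.insert gr.2 ((findSplitAux parts 0 (-1, 1)).1)
                  (PySem.List.slice gr.1 none (some (PySem.Int.floordiv (gr.1.length : Int) 2))))
                ((findSplitAux parts 0 (-1, 1)).1 + 1)
                (PySem.List.slice gr.1 (some (PySem.Int.floordiv (gr.1.length : Int) 2)) none))

-- n split steps of A
def iterA : List (List Int) → Nat → List (List Int)
  | parts, 0 => parts
  | parts, n + 1 =>
      match stepA parts with
      | none => parts
      | some p => iterA p n

theorem iterA_of_stepA_none {parts : List (List Int)} (h : stepA parts = none) (n : Nat) :
    iterA parts n = parts := by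
  cases n with
  | zero => rfl
  | succ n => simp [iterA, h]

theorem findSplitAux_const (l : List (List Int)) (idx : Int) (acc : Int × Int)
    (h : ∀ g ∈ l, (g.length : Int) ≤ acc.2) : findSplitAux l idx acc = acc := by
  induction l generalizing idx with
  | nil => rfl
  | cons g rest ih =>
      have hg : (g.length : Int) ≤ acc.2 := h g (by simp)
      rw [findSplitAux, if_neg (by omega)]
      exact ih (idx + 1) (fun g hg' => h g (by simp [hg']))

theorem findSplitAux_locate (pre : List (List Int)) (g : List Int) (rest : List (List Int))
    (idx bi bl m : Int) (hpre : ∀ p ∈ pre, (p.length : Int) < m) (hg : (g.length : Int) = m)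
    (hrest : ∀ r ∈ rest, (r.length : Int) ≤ m) (hbl : bl < m) :
    findSplitAux (pre ++ g :: rest) idx (bi, bl) = (idx + pre.length, m) := by
  induction pre generalizing idx bi bl with
  | nil =>
      simp only [List.nil_append, findSplitAux, if_pos (by omega : (g.length : Int) > bl)]
      rw [hg, findSplitAux_const rest (idx + 1) (idx, m) (by simpa using hrest)]
      simp
  | cons p pre ih =>
      have hp : (p.length : Int) < m := hpre p (by simp)
      rw [List.cons_append, findSplitAux]
      by_cases hc : (p.length : Int) > bl
      · rw [if_pos hc, ih (idx + 1) idx (p.length : Int) (fun q hq => hpre q (by simp [hq])) hp]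
        simp; omega
      · rw [if_neg hc, ih (idx + 1) bi bl (fun q hq => hpre q (by simp [hq])) hbl]
        simp; omega

theorem stepA_none_of_small (parts : List (List Int)) (h : ∀ g ∈ parts, (g.length : Int) ≤ 1) :
    stepA parts = none := by
  unfold stepA
  rw [findSplitAux_const parts 0 (-1, 1) (by simpa using h)]
  simp

-- where stepA splits: the first piece of maximal length m ≥ 2
theorem stepA_locate (pre : List (List Int)) (g : List Int) (rest : List (List Int)) (m : Int)
    (hm : 2 ≤ m) (hpre : ∀ p ∈ pre, (p.length : Int) < m) (hg : (g.length : Int) = m)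
    (hrest : ∀ r ∈ rest, (r.length : Int) ≤ m) :
    stepA (pre ++ g :: rest) =
      some (pre ++ g.take (g.length / 2) :: g.drop (g.length / 2) :: rest) := by
  unfold stepA
  rw [findSplitAux_locate pre g rest 0 (-1) 1 m hpre hg hrest (by omega)]
  simp only [zero_add]
  rw [if_neg (by omega)]
  rw [PySem.List.pop?_natCast (pre ++ g :: rest) pre.length (by simp)]
  have e1 : (pre ++ g :: rest).eraseIdx pre.length = pre ++ rest := by
    rw [List.eraseIdx_append_of_length_le (le_refl _)]; simp
  have e2 : (pre ++ g :: rest)[pre.length]'(by simp) = g := List.getElem_of_append rfl rfl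
  simp only [e1, e2, slice_half_left, slice_half_right]
  have i1 : PySem.List.insert (pre ++ rest) ((pre.length : Int)) (g.take (g.length / 2))
      = (pre ++ [g.take (g.length / 2)]) ++ rest := by
    rw [PySem.List.insert_natCast _ pre.length _ (by simp), List.take_left, List.drop_left]
    simp
  have hcast : ((pre.length : Int) + 1) = ((pre.length + 1 : Nat) : Int) := by push_cast; ring
  have i2 : PySem.List.insert ((pre ++ [g.take (g.length / 2)]) ++ rest)
      ((pre.length : Int) + 1) (g.drop (g.length / 2))
      = pre ++ g.take (g.length / 2) :: g.drop (g.length / 2) :: rest := by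
    rw [hcast, PySem.List.insert_natCast _ (pre.length + 1) _ (by simp),
        List.take_left' (by simp), List.drop_left' (by simp)]
    simp
  rw [i1, i2]

theorem loopA_eq_iterA (t : Int) (n : Nat) : ∀ parts : List (List Int),
    n = (t - (parts.length : Int)).toNat → loopA parts t = iterA parts n := by
  induction n with
  | zero =>
      intro parts hn
      unfold loopA
      rw [if_neg (by omega), iterA]
  | succ n ih =>
      intro parts hn
      have hlt : (parts.length : Int) < t := by omega
      unfold loopA
      rw [if_pos hlt, iterA]
      unfold stepA
      by_cases hsi : (findSplitAux parts 0 (-1, 1)).1 < 0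
      · simp [hsi]
      · simp only [if_neg hsi]
        cases h : PySem.List.pop? parts ((findSplitAux parts 0 (-1, 1)).1) with
        | none => simp
        | some gr =>
            simp only []
            have hl := PySem.List.length_of_pop?_eq_some _ h
            apply ih
            simp only [PySem.List.length_insert]
            omega

theorem roundB_nonpos (parts : List (List Int)) (need m : Int) (h : ¬ need > 0) :
    roundB parts need m = (parts, need) := by
  induction parts with
  | nil => rfl
  | cons g rest ih =>
      rw [roundB, if_neg (by intro hc; exact h hc.1), ih]

-- one B-round equals the corresponding run of A-steps
theorem round_sim (parts : List (List Int)) : ∀ (pre : List (List Int)) (need m : Int),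
    2 ≤ m → (∀ p ∈ pre, (p.length : Int) < m) → (∀ g ∈ parts, (g.length : Int) ≤ m) →
    0 ≤ need →
    iterA (pre ++ parts) need.toNat = iterA (pre ++ (roundB parts need m).1) ((roundB parts need m).2).toNat := by
  induction parts with
  | nil => intro pre need m _ _ _ _; rfl
  | cons g rest ih =>
      intro pre need m hm hpre hall hneed
      by_cases hc : need > 0 ∧ (g.length : Int) = m
      · simp only [roundB, if_pos hc]
        have hg2 : 2 ≤ g.length := by omega
        have hstep := stepA_locate pre g rest m hm hpre hc.2 (fun r hr => hall r (by simp [hr]))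
        have hn1 : need.toNat = (need - 1).toNat + 1 := by omega
        rw [hn1, iterA, hstep]
        have hdlt : g.length / 2 < g.length := Nat.div_lt_self (by omega) (by omega)
        have hd2 : 1 ≤ g.length / 2 := (Nat.one_le_div_iff (by omega)).mpr (by omega)
        have hhalves : ∀ p ∈ pre ++ [g.take (g.length / 2), g.drop (g.length / 2)],
            (p.length : Int) < m := by
          intro p hp
          rcases List.mem_append.mp hp with h1 | h1
          · exact hpre p h1
          · simp only [List.mem_cons, List.not_mem_nil, or_false] at h1
            rcases h1 with rfl | rfl
            · simp; omega
            · simp; omega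
        have hrec := ih (pre ++ [g.take (g.length / 2), g.drop (g.length / 2)]) (need - 1) m hm
          hhalves (fun r hr => hall r (by simp [hr])) (by omega)
        simp only [slice_half_left, slice_half_right]
        simpa using hrec
      · simp only [roundB, if_neg hc]
        by_cases hn : need > 0
        · have hglt : (g.length : Int) < m := by
            have h1 := hall g (by simp)
            rcases lt_or_eq_of_le h1 with h2 | h2
            · exact h2
            · exact absurd ⟨hn, h2⟩ hc
          have hrec := ih (pre ++ [g]) need m hm
            (by intro p hp
                rcases List.mem_append.mp hp with h1 | h1
                · exact hpre p h1
                · simp only [List.mem_cons, List.not_mem_nil, or_false] at h1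
                  subst h1; exact hglt)
            (fun r hr => hall r (by simp [hr])) hneed
          simpa using hrec
        · rw [roundB_nonpos rest need m hn]

theorem loopB_eq_iterA (n : Nat) : ∀ (parts : List (List Int)) (need : Int),
    need.toNat ≤ n → loopB parts need = iterA parts need.toNat := by
  induction n with
  | zero =>
      intro parts need hn
      unfold loopB
      rw [if_neg (by omega)]
      have h0 : need.toNat = 0 := by omega
      rw [h0, iterA]
  | succ n ih =>
      intro parts need hn
      by_cases hpos : need > 0
      · unfold loopB
        rw [if_pos hpos]
        by_cases hm : maxLenB parts ≤ 1
        · rw [if_pos hm]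
          have hsmall : ∀ g ∈ parts, (g.length : Int) ≤ 1 := by
            intro g hg
            have h1 := (PySem.List.le_foldl_max_int parts (fun g => (g.length : Int)) 0).2 g hg
            unfold maxLenB at hm
            omega
          rw [iterA_of_stepA_none (stepA_none_of_small parts hsmall)]
        · rw [if_neg hm]
          have hx : ∃ g ∈ parts, (g.length : Int) = maxLenB parts := by
            rcases maxLenB_attained parts with h | h
            · omega
            · exact h
          have hlt := roundB_need_lt parts need (maxLenB parts) hpos hx
          have hb := roundB_need_bounds parts need (maxLenB parts) (by omega)
          have hall : ∀ g ∈ parts, (g.length : Int) ≤ maxLenB parts := by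
            intro g hg
            have h1 := (PySem.List.le_foldl_max_int parts (fun g => (g.length : Int)) 0).2 g hg
            unfold maxLenB
            omega
          have hsim := round_sim parts [] need (maxLenB parts) (by omega) (by simp) hall (by omega)
          simp only [List.nil_append] at hsim
          rw [hsim,
            ih (roundB parts need (maxLenB parts)).1 (roundB parts need (maxLenB parts)).2 (by omega)]
      · unfold loopB
        rw [if_neg hpos]
        have h0 : need.toNat = 0 := by omega
        rw [h0, iterA]

-- ===== VERDICT (by name: the statement is the Claim_ definition above) =====
theorem rebalance_groups_to_target_py_spec : Claim_equal_rebalance_groups_to_target_py := by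
  intro groups target_parts _
  unfold Spec_rebalance_groups_to_target_py rebalance_groups_to_target_py rebalance_groups_to_target_py_alt
  by_cases h : ((groups.filter (fun g => !g.isEmpty)).map (fun g => PySem.List.slice g none none)).isEmpty
  · simp only [if_pos h]
  · simp only [if_neg h]
    rw [loopA_eq_iterA target_parts
          (target_parts - (((groups.filter (fun g => !g.isEmpty)).map (fun g => PySem.List.slice g none none)).length : Int)).toNat
          _ rfl,
        loopB_eq_iterA
          (target_parts - (((groups.filter (fun g => !g.isEmpty)).map (fun g => PySem.List.slice g none none)).length : Int)).toNat
          _ _ le_rfl]
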